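-- pv_equiv track=rewrite | github.com/epoyraz/leetcode | solutions/2184.py | possiblyEquals
-- ===== SOURCE A (Python) =====
-- from collections import deque
--
-- def possiblyEquals(s1, s2):
--     """
--     Returns True if there exists an original string that can be encoded
--     as both s1 and s2 according to the described rules.
--     """
--     N1, N2 = len(s1), len(s2)
--     # BFS state: (i, j, diff)
--     seen = set()
--     dq = deque([(0, 0, 0)])
--     seen.add((0, 0, 0))
--
--     while dq:
--         i, j, diff = dq.popleft()
--         # If both strings consumed and balanced, success
--         if i == N1 and j == N2 and diff == 0:
--             return True
--
--         # diff == 0: align new letters or introduce skips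
--         if diff == 0:
--             # match letters
--             if i < N1 and j < N2 and s1[i].isalpha() and s2[j].isalpha():
--                 if s1[i] == s2[j]:
--                     state = (i+1, j+1, 0)
--                     if state not in seen:
--                         seen.add(state)
--                         dq.append(state)
--             # skip via number in s1
--             if i < N1 and s1[i].isdigit():
--                 num = 0
--                 for k in range(i, min(N1, i+3)):
--                     if s1[k].isdigit():
--                         num = num*10 + int(s1[k])
--                         state = (k+1, j, diff + num)
--                         if state not in seen:
--                             seen.add(state)
--                             dq.append(state)
--                     else:
--                         break
--             # skip via number in s2
--             if j < N2 and s2[j].isdigit():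
--                 num = 0
--                 for k in range(j, min(N2, j+3)):
--                     if s2[k].isdigit():
--                         num = num*10 + int(s2[k])
--                         state = (i, k+1, diff - num)
--                         if state not in seen:
--                             seen.add(state)
--                             dq.append(state)
--                     else:
--                         break
--
--         # diff > 0: s1 is ahead, consume from s2
--         elif diff > 0:
--             # consume a letter from s2
--             if j < N2 and s2[j].isalpha():
--                 state = (i, j+1, diff-1)
--                 if state not in seen:
--                     seen.add(state)
--                     dq.append(state)
--             # consume via number in s2
--             if j < N2 and s2[j].isdigit():
--                 num = 0
--                 for k in range(j, min(N2, j+3)):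
--                     if s2[k].isdigit():
--                         num = num*10 + int(s2[k])
--                         state = (i, k+1, diff - num)
--                         if state not in seen:
--                             seen.add(state)
--                             dq.append(state)
--                     else:
--                         break
--
--         # diff < 0: s2 is ahead, consume from s1
--         else:
--             # consume a letter from s1
--             if i < N1 and s1[i].isalpha():
--                 state = (i+1, j, diff+1)
--                 if state not in seen:
--                     seen.add(state)
--                     dq.append(state)
--             # consume via number in s1
--             if i < N1 and s1[i].isdigit():
--                 num = 0
--                 for k in range(i, min(N1, i+3)):
--                     if s1[k].isdigit():
--                         num = num*10 + int(s1[k])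
--                         state = (k+1, j, diff + num)
--                         if state not in seen:
--                             seen.add(state)
--                             dq.append(state)
--                     else:
--                         break
--
--     return False
-- ===== SOURCE B (Python) =====
-- def possiblyEquals(s1, s2):
--     """
--     Returns True if there exists an original string that can be encoded
--     as both s1 and s2 according to the described rules.
--     """
--     N1, N2 = len(s1), len(s2)
--
--     def nums(s, i, N):
--         """(end, value) pairs for the 1-3 digit numbers starting at i."""
--         res = []
--         if i < N and s[i].isdigit():
--             num = 0
--             for k in range(i, min(N, i + 3)):
--                 if not s[k].isdigit():
--                     break
--                 num = num * 10 + int(s[k])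
--                 res.append((k + 1, num))
--         return res
--
--     def succs(i, j, diff):
--         """Successor states, by a flat guard list (order is irrelevant)."""
--         out = []
--         if diff == 0 and i < N1 and j < N2 and s1[i].isalpha() and s2[j].isalpha() and s1[i] == s2[j]:
--             out.append((i + 1, j + 1, 0))
--         if diff > 0 and j < N2 and s2[j].isalpha():
--             out.append((i, j + 1, diff - 1))
--         if diff < 0 and i < N1 and s1[i].isalpha():
--             out.append((i + 1, j, diff + 1))
--         if diff >= 0:
--             out += [(i, k, diff - n) for (k, n) in nums(s2, j, N2)]
--         if diff <= 0:
--             out += [(k, j, diff + n) for (k, n) in nums(s1, i, N1)]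
--         return out
--
--     # forward sweep: bucket the reachable states by level i + j
--     # (every move strictly increases i + j, so buckets below the cursor are final)
--     levels = [set() for _ in range(N1 + N2 + 1)]
--     levels[0].add((0, 0, 0))
--     for L in range(N1 + N2 + 1):
--         for st in levels[L]:
--             for t in succs(*st):
--                 levels[t[0] + t[1]].add(t)
--
--     # backward sweep: winnability of each bucketed state, deepest level first
--     win = {}
--     for L in range(N1 + N2, -1, -1):
--         for st in levels[L]:
--             win[st] = (st[0] == N1 and st[1] == N2 and st[2] == 0) \
--                 or any(win[t] for t in succs(*st))
--     return win[(0, 0, 0)]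
-- ===== Notes on version B (the rewrite author's own statement) =====
-- stated objective: alternative
-- what changed: Replaced A's early-exit BFS (deque + seen set, acceptance tested on pop) by a two-phase level sweep: a forward pass bucketing the reachable (i, j, diff) states by level i+j (every move strictly increases i+j), then a backward per-level dynamic program computing winnability of every bucketed state; successors come from a flat guard list built on (end, value) pairs of the parsed number groups instead of A's inline push loops.
import Mathlib
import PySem

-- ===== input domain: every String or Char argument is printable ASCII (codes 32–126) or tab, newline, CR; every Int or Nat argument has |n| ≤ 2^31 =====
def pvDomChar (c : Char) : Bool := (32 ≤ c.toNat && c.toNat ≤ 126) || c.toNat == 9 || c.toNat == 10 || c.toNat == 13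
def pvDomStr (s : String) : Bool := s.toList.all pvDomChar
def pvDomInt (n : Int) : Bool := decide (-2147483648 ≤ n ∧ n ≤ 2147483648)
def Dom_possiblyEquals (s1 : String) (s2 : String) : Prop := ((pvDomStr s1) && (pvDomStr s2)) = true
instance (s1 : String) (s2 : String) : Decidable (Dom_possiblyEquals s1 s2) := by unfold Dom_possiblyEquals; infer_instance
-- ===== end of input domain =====

-- B replaces A's early-exit BFS over (i, j, diff) states by a two-phase level sweep: a forward
-- pass bucketing the reachable states by level i + j, then a backward per-level winnability
-- computation (alternative decomposition; same asymptotic cost).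

-- ===== PORT A =====
-- Search states are (i, j, diff); Python's repeated pattern `if state not in seen: seen.add(state); dq.append(state)`:
def pvPush (seen : PySem.Set (Nat × Nat × Int)) (dq : List (Nat × Nat × Int))
    (st : Nat × Nat × Int) : PySem.Set (Nat × Nat × Int) × List (Nat × Nat × Int) :=
  if PySem.Set.contains seen st then (seen, dq) else (PySem.Set.add seen st, dq ++ [st])

-- A's digit loop `for k in range(start, stop): if s[k].isdigit(): num = num*10+int(s[k]); push(mk(k+1,num)) else: break`;
-- `mk` builds the pushed state from (k+1, num) as in the three textually-identical loops of A.
-- Indexing a.getD is exact here: the loop only reads k < stop ≤ len(a).  int(c) of a digit char is c.toNat - 48.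
def pvALoop (a : List Char) (mk : Nat → Int → Nat × Nat × Int) (k stop : Nat) (num : Int)
    (sd : PySem.Set (Nat × Nat × Int) × List (Nat × Nat × Int)) :
    PySem.Set (Nat × Nat × Int) × List (Nat × Nat × Int) :=
  if _h : k < stop then
    let c := a.getD k ' '
    if PySem.Chars.isdigit c then
      let num' := num * 10 + ((c.toNat : Int) - 48)
      pvALoop a mk (k+1) stop num' (pvPush sd.1 sd.2 (mk (k+1) num'))
    else sd
  else sd
termination_by stop - k
decreasing_by omega

-- the body of A's while-loop after the popped state failed the acceptance test
def pvStep (a1 a2 : List Char) (i j : Nat) (diff : Int)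
    (seen : PySem.Set (Nat × Nat × Int)) (q : List (Nat × Nat × Int)) :
    PySem.Set (Nat × Nat × Int) × List (Nat × Nat × Int) :=
  let N1 := a1.length
  let N2 := a2.length
  if diff = 0 then
    let sd := if i < N1 ∧ j < N2 ∧ PySem.Chars.isalpha (a1.getD i ' ') ∧ PySem.Chars.isalpha (a2.getD j ' ') then
                (if a1.getD i ' ' = a2.getD j ' ' then pvPush seen q (i+1, j+1, 0) else (seen, q))
              else (seen, q)
    let sd := if i < N1 ∧ PySem.Chars.isdigit (a1.getD i ' ') then
                pvALoop a1 (fun k1 n => (k1, j, diff + n)) i (min N1 (i+3)) 0 sd else sd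
    let sd := if j < N2 ∧ PySem.Chars.isdigit (a2.getD j ' ') then
                pvALoop a2 (fun k1 n => (i, k1, diff - n)) j (min N2 (j+3)) 0 sd else sd
    sd
  else if diff > 0 then
    let sd := if j < N2 ∧ PySem.Chars.isalpha (a2.getD j ' ') then pvPush seen q (i, j+1, diff - 1) else (seen, q)
    let sd := if j < N2 ∧ PySem.Chars.isdigit (a2.getD j ' ') then
                pvALoop a2 (fun k1 n => (i, k1, diff - n)) j (min N2 (j+3)) 0 sd else sd
    sd
  else
    let sd := if i < N1 ∧ PySem.Chars.isalpha (a1.getD i ' ') then pvPush seen q (i+1, j, diff + 1) else (seen, q)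
    let sd := if i < N1 ∧ PySem.Chars.isdigit (a1.getD i ' ') then
                pvALoop a1 (fun k1 n => (k1, j, diff + n)) i (min N1 (i+3)) 0 sd else sd
    sd

-- A's while-loop; `fuel` only makes it total (each iteration pops a state, every state enters
-- `seen` at most once, and — proved below — all states lie in a space of size (N1+1)*(N2+1)*1999).
def pvBFS (a1 a2 : List Char) : Nat → List (Nat × Nat × Int) → PySem.Set (Nat × Nat × Int) → Bool
  | 0, _, _ => false
  | fuel+1, dq, seen =>
    match dq with
    | [] => false
    | (i, j, diff) :: rest =>
      if i = a1.length ∧ j = a2.length ∧ diff = 0 then true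
      else
        let sd := pvStep a1 a2 i j diff seen rest
        pvBFS a1 a2 fuel sd.2 sd.1

def possiblyEquals (s1 : String) (s2 : String) : Bool :=
  let a1 := s1.toList
  let a2 := s2.toList
  pvBFS a1 a2 ((a1.length + 1) * (a2.length + 1) * 1999)
    [(0, 0, 0)] (PySem.Set.add PySem.Set.empty (0, 0, 0))

-- ===== PORT B =====
abbrev PvState : Type := Nat × Nat × Int

-- Source B's `nums(s, i, N)`: the (end, value) pairs of the 1-3 digit numbers starting at i
def pvNumLoop (cs : List Char) (e hi : Nat) (acc : Int) : List (Nat × Int) :=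
  if _h : e < hi then
    if PySem.Chars.isdigit (cs.getD e ' ') then
      let acc' := acc * 10 + (((cs.getD e ' ').toNat : Int) - 48)
      (e + 1, acc') :: pvNumLoop cs (e + 1) hi acc'
    else []
  else []
termination_by hi - e
decreasing_by omega

def pvNums (cs : List Char) (b hi : Nat) : List (Nat × Int) :=
  if b < hi ∧ PySem.Chars.isdigit (cs.getD b ' ') then pvNumLoop cs b (min hi (b + 3)) 0 else []

-- Source B's `succs(i, j, diff)`: a flat guard list
def pvSuccs (xs ys : List Char) (c : PvState) : List PvState :=
  let p := c.1
  let q := c.2.1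
  let d := c.2.2
  (if d = 0 ∧ p < xs.length ∧ q < ys.length ∧ PySem.Chars.isalpha (xs.getD p ' ')
      ∧ PySem.Chars.isalpha (ys.getD q ' ') ∧ xs.getD p ' ' = ys.getD q ' ' then
     [(p + 1, q + 1, (0 : Int))] else [])
  ++ (if d > 0 ∧ q < ys.length ∧ PySem.Chars.isalpha (ys.getD q ' ') then
     [(p, q + 1, d - 1)] else [])
  ++ (if d < 0 ∧ p < xs.length ∧ PySem.Chars.isalpha (xs.getD p ' ') then
     [(p + 1, q, d + 1)] else [])
  ++ (if d ≥ 0 then (pvNums ys q ys.length).map (fun v => (p, v.1, d - v.2)) else [])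
  ++ (if d ≤ 0 then (pvNums xs p xs.length).map (fun v => (v.1, q, d + v.2)) else [])

-- hand port of `levels[n].add(w)` on the fixed-length bucket list (exact: Source B's index
-- w[0]+w[1] is always in range, proved below for every state the sweep generates)
def pvBucketAdd : List (PySem.Set PvState) → Nat → PvState → List (PySem.Set PvState)
  | [], _, _ => []
  | g :: gs, 0, w => PySem.Set.add g w :: gs
  | g :: gs, n + 1, w => g :: pvBucketAdd gs n w

-- forward sweep `for L in range(N1+N2+1): for st in levels[L]: for t in succs(*st): levels[...].add(t)`
def pvForward (xs ys : List Char) (buckets : List (PySem.Set PvState)) : List (PySem.Set PvState) :=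
  (List.range (xs.length + ys.length + 1)).foldl (fun bk n =>
    (bk.getD n PySem.Set.empty).foldl (fun bk' c =>
      (pvSuccs xs ys c).foldl (fun bk'' w => pvBucketAdd bk'' (w.1 + w.2.1) w) bk') bk) buckets

-- backward sweep; the lookup win[t] is ported as getD, exact here: every successor of a
-- bucketed state is already a key when it is read (proved below)
def pvBackward (xs ys : List Char) (buckets : List (PySem.Set PvState)) : PySem.Dict PvState Bool :=
  ((List.range (xs.length + ys.length + 1)).reverse).foldl (fun m n =>
    (buckets.getD n PySem.Set.empty).foldl (fun m' c =>
      m'.insert c (decide (c.1 = xs.length ∧ c.2.1 = ys.length ∧ c.2.2 = 0)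
        || (pvSuccs xs ys c).any (fun w => m'.getD w false))) m) PySem.Dict.empty

def possiblyEquals_alt (s1 : String) (s2 : String) : Bool :=
  let xs := s1.toList
  let ys := s2.toList
  (pvBackward xs ys (pvForward xs ys
    (pvBucketAdd (List.replicate (xs.length + ys.length + 1) PySem.Set.empty) 0 (0, 0, 0)))).getD
    (0, 0, 0) false

-- ===== PRECONDITION & SPEC =====
def Spec_possiblyEquals (s1 : String) (s2 : String) (out : Bool) : Prop := out = possiblyEquals_alt s1 s2
instance (s1 : String) (s2 : String) (out : Bool) : Decidable (Spec_possiblyEquals s1 s2 out) := by unfold Spec_possiblyEquals; infer_instance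

-- ===== CLAIM (what is proved, stated in full; the proofs are below) =====
def Claim_equal_possiblyEquals : Prop := ∀ (s1 : String) (s2 : String), Dom_possiblyEquals s1 s2 → Spec_possiblyEquals s1 s2 (possiblyEquals s1 s2)

-- ===== LEMMAS AND PROOFS =====

theorem pvDigitVal (c : Char) (h : PySem.Chars.isdigit c = true) : 48 ≤ c.toNat ∧ c.toNat ≤ 57 := by
  simp only [PySem.Chars.isdigit, Bool.and_eq_true, decide_eq_true_eq, Char.le_def,
    UInt32.le_iff_toNat_le] at h
  exact h

theorem pvNumLoop_shape (s : List Char) :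
    ∀ (m k stop : Nat) (num : Int), stop - k = m → 0 ≤ num →
      ∀ p ∈ pvNumLoop s k stop num,
        ∃ k' n, p = (k' + 1, n) ∧ k ≤ k' ∧ k' < stop ∧ 0 ≤ n ∧ n < (num + 1) * 10 ^ (stop - k) := by
  intro m
  induction m with
  | zero =>
    intro k stop num hm _ p hp
    rw [pvNumLoop] at hp
    simp [show ¬ k < stop by omega] at hp
  | succ m ih =>
    intro k stop num hm hnum p hp
    have hk : k < stop := by omega
    rw [pvNumLoop] at hp
    simp only [hk, dite_true] at hp
    by_cases hd : PySem.Chars.isdigit (s.getD k ' ') = true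
    · simp only [hd, if_true, List.mem_cons] at hp
      have hdig : 48 ≤ (s.getD k ' ').toNat ∧ (s.getD k ' ').toNat ≤ 57 := pvDigitVal _ hd
      set num' := num * 10 + (((s.getD k ' ').toNat : Int) - 48) with hnum'
      have hnum'0 : 0 ≤ num' := by
        have : (48:Int) ≤ ((s.getD k ' ').toNat : Int) := by exact_mod_cast hdig.1
        nlinarith
      have hpow : (1:Int) ≤ 10 ^ m := one_le_pow₀ (by norm_num)
      have hsk : stop - k = m + 1 := hm
      have hps : (10:Int) ^ (stop - k) = 10 ^ m * 10 := by rw [hsk, pow_succ]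
      have hub : num' < (num + 1) * 10 := by
        have : ((s.getD k ' ').toNat : Int) ≤ 57 := by exact_mod_cast hdig.2
        nlinarith
      rcases hp with hp | hp
      · exact ⟨k, num', hp, le_refl k, hk, hnum'0, by rw [hps]; nlinarith⟩
      · obtain ⟨k', n, hpe, hk', hk's, hn0, hnub⟩ := ih (k+1) stop num' (by omega) hnum'0 p hp
        refine ⟨k', n, hpe, by omega, hk's, hn0, ?_⟩
        have : stop - (k+1) = m := by omega
        rw [this] at hnub
        rw [hps]
        nlinarith
    · rw [if_neg hd] at hp
      simp at hp

theorem pvNums_mem (s : List Char) (i N : Nat) (p : Nat × Int) (hp : p ∈ pvNums s i N) :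
    ∃ k' n, p = (k' + 1, n) ∧ i ≤ k' ∧ k' < N ∧ k' < i + 3 ∧ (0:Int) ≤ n ∧ n ≤ 999 := by
  unfold pvNums at hp
  by_cases hG : i < N ∧ PySem.Chars.isdigit (s.getD i ' ') = true
  · rw [if_pos hG] at hp
    obtain ⟨k', n, hpe, hik, hks, hn0, hnub⟩ :=
      pvNumLoop_shape s (min N (i+3) - i) i (min N (i+3)) 0 rfl le_rfl p hp
    have hle : (10:Int) ^ (min N (i+3) - i) ≤ 10 ^ 3 :=
      pow_le_pow_right₀ (by norm_num) (by omega)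
    refine ⟨k', n, hpe, hik, by omega, by omega, hn0, by norm_num at hle; omega⟩
  · rw [if_neg hG] at hp
    simp at hp

def pvMsr (a1 a2 : List Char) (s : Nat × Nat × Int) : Nat :=
  (a1.length - s.1) + (a2.length - s.2.1)

def pvInSpace (a1 a2 : List Char) (s : Nat × Nat × Int) : Prop :=
  s.1 ≤ a1.length ∧ s.2.1 ≤ a2.length ∧ -999 ≤ s.2.2 ∧ s.2.2 ≤ 999

theorem pvSuccs_mem_facts (a1 a2 : List Char) (s t : Nat × Nat × Int) (ht : t ∈ pvSuccs a1 a2 s) :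
    ((t.1 = s.1 ∧ s.2.1 < t.2.1 ∧ t.2.1 ≤ a2.length) ∨
     (t.2.1 = s.2.1 ∧ s.1 < t.1 ∧ t.1 ≤ a1.length) ∨
     (s.1 < t.1 ∧ t.1 ≤ a1.length ∧ s.2.1 < t.2.1 ∧ t.2.1 ≤ a2.length)) ∧
    (-999 ≤ s.2.2 → s.2.2 ≤ 999 → -999 ≤ t.2.2 ∧ t.2.2 ≤ 999) := by
  obtain ⟨i, j, diff⟩ := s
  unfold pvSuccs at ht
  simp only at ht ⊢
  simp only [List.mem_append] at ht
  rcases ht with ((((ht | ht) | ht) | ht) | ht)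
  · by_cases hG : diff = 0 ∧ i < a1.length ∧ j < a2.length ∧ PySem.Chars.isalpha (a1.getD i ' ') = true
        ∧ PySem.Chars.isalpha (a2.getD j ' ') = true ∧ a1.getD i ' ' = a2.getD j ' '
    · rw [if_pos hG, List.mem_singleton] at ht
      subst ht
      obtain ⟨h0, hi, hj, -⟩ := hG
      refine ⟨Or.inr (Or.inr ⟨?_, ?_, ?_, ?_⟩), fun hl hr => ⟨?_, ?_⟩⟩ <;> simp only <;> omega
    · rw [if_neg hG] at ht
      exact absurd ht (List.not_mem_nil)
  · by_cases hG : diff > 0 ∧ j < a2.length ∧ PySem.Chars.isalpha (a2.getD j ' ') = true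
    · rw [if_pos hG, List.mem_singleton] at ht
      subst ht
      obtain ⟨h0, hj, -⟩ := hG
      refine ⟨Or.inl ⟨?_, ?_, ?_⟩, fun hl hr => ⟨?_, ?_⟩⟩ <;> simp only <;> omega
    · rw [if_neg hG] at ht
      exact absurd ht (List.not_mem_nil)
  · by_cases hG : diff < 0 ∧ i < a1.length ∧ PySem.Chars.isalpha (a1.getD i ' ') = true
    · rw [if_pos hG, List.mem_singleton] at ht
      subst ht
      obtain ⟨h0, hi, -⟩ := hG
      refine ⟨Or.inr (Or.inl ⟨?_, ?_, ?_⟩), fun hl hr => ⟨?_, ?_⟩⟩ <;> simp only <;> omega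
    · rw [if_neg hG] at ht
      exact absurd ht (List.not_mem_nil)
  · by_cases hG : diff ≥ 0
    · rw [if_pos hG] at ht
      rcases List.mem_map.mp ht with ⟨p, hp, rfl⟩
      obtain ⟨k', n, rfl, h1, h2, h3, h4, h5⟩ := pvNums_mem _ _ _ _ hp
      refine ⟨Or.inl ⟨?_, ?_, ?_⟩, fun hl hr => ⟨?_, ?_⟩⟩ <;> simp only <;> omega
    · rw [if_neg hG] at ht
      exact absurd ht (List.not_mem_nil)
  · by_cases hG : diff ≤ 0
    · rw [if_pos hG] at ht
      rcases List.mem_map.mp ht with ⟨p, hp, rfl⟩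
      obtain ⟨k', n, rfl, h1, h2, h3, h4, h5⟩ := pvNums_mem _ _ _ _ hp
      refine ⟨Or.inr (Or.inl ⟨?_, ?_, ?_⟩), fun hl hr => ⟨?_, ?_⟩⟩ <;> simp only <;> omega
    · rw [if_neg hG] at ht
      exact absurd ht (List.not_mem_nil)

theorem pvSuccs_msr (a1 a2 : List Char) (s t : Nat × Nat × Int) (ht : t ∈ pvSuccs a1 a2 s) :
    pvMsr a1 a2 t < pvMsr a1 a2 s := by
  obtain ⟨hd, -⟩ := pvSuccs_mem_facts a1 a2 s t ht
  unfold pvMsr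
  rcases hd with ⟨e1, e2, e3⟩ | ⟨e1, e2, e3⟩ | ⟨e1, e2, e3, e4⟩ <;> omega

theorem pvSuccs_key (a1 a2 : List Char) (s t : Nat × Nat × Int) (ht : t ∈ pvSuccs a1 a2 s)
    (hs1 : s.1 ≤ a1.length) (hs2 : s.2.1 ≤ a2.length) :
    s.1 + s.2.1 < t.1 + t.2.1 ∧ t.1 ≤ a1.length ∧ t.2.1 ≤ a2.length := by
  obtain ⟨hd, -⟩ := pvSuccs_mem_facts a1 a2 s t ht
  rcases hd with ⟨e1, e2, e3⟩ | ⟨e1, e2, e3⟩ | ⟨e1, e2, e3, e4⟩ <;> refine ⟨by omega, by omega, by omega⟩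

theorem pvSuccs_space (a1 a2 : List Char) (s t : Nat × Nat × Int)
    (hs : pvInSpace a1 a2 s) (ht : t ∈ pvSuccs a1 a2 s) : pvInSpace a1 a2 t := by
  obtain ⟨hd, h6⟩ := pvSuccs_mem_facts a1 a2 s t ht
  obtain ⟨hs1, hs2, hs3, hs4⟩ := hs
  refine ⟨?_, ?_, (h6 hs3 hs4).1, (h6 hs3 hs4).2⟩ <;>
    (rcases hd with ⟨e1, e2, e3⟩ | ⟨e1, e2, e3⟩ | ⟨e1, e2, e3, e4⟩ <;> omega)

-- the canonical winnability of a state (the ground truth both programs compute)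
def pvWin (a1 a2 : List Char) : Nat → Nat × Nat × Int → Bool
  | 0, _ => false
  | fuel+1, s =>
    decide (s.1 = a1.length ∧ s.2.1 = a2.length ∧ s.2.2 = 0) || (pvSuccs a1 a2 s).any (pvWin a1 a2 fuel)

def pvW (a1 a2 : List Char) (s : Nat × Nat × Int) : Bool := pvWin a1 a2 (pvMsr a1 a2 s + 1) s

theorem pvWin_agree (a1 a2 : List Char) :
    ∀ (n f1 f2 : Nat) (s : Nat × Nat × Int), pvMsr a1 a2 s < n →
      pvMsr a1 a2 s < f1 → pvMsr a1 a2 s < f2 → pvWin a1 a2 f1 s = pvWin a1 a2 f2 s := by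
  intro n
  induction n with
  | zero => intro f1 f2 s h; omega
  | succ n ih =>
    intro f1 f2 s hn h1 h2
    obtain ⟨g1, rfl⟩ : ∃ g1, f1 = g1 + 1 := ⟨f1 - 1, by omega⟩
    obtain ⟨g2, rfl⟩ : ∃ g2, f2 = g2 + 1 := ⟨f2 - 1, by omega⟩
    simp only [pvWin]
    have hany : (pvSuccs a1 a2 s).any (pvWin a1 a2 g1) = (pvSuccs a1 a2 s).any (pvWin a1 a2 g2) := by
      apply Bool.eq_iff_iff.mpr
      simp only [List.any_eq_true]
      constructor
      · rintro ⟨t, htm, hw⟩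
        have hlt := pvSuccs_msr a1 a2 s t htm
        exact ⟨t, htm, by rw [← ih g1 g2 t (by omega) (by omega) (by omega)]; exact hw⟩
      · rintro ⟨t, htm, hw⟩
        have hlt := pvSuccs_msr a1 a2 s t htm
        exact ⟨t, htm, by rw [ih g1 g2 t (by omega) (by omega) (by omega)]; exact hw⟩
    rw [hany]

theorem pvWin_stable (a1 a2 : List Char) (fuel : Nat) (s : Nat × Nat × Int)
    (h : pvMsr a1 a2 s < fuel) : pvWin a1 a2 fuel s = pvW a1 a2 s :=
  pvWin_agree a1 a2 (pvMsr a1 a2 s + 1) fuel (pvMsr a1 a2 s + 1) s (by omega) h (by omega)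

theorem pvNoWin (a1 a2 : List Char) (seen : List (Nat × Nat × Int))
    (H : ∀ s ∈ seen, ¬(s.1 = a1.length ∧ s.2.1 = a2.length ∧ s.2.2 = 0) ∧
          ∀ t ∈ pvSuccs a1 a2 s, t ∈ seen) :
    ∀ s ∈ seen, pvW a1 a2 s = false := by
  suffices h : ∀ (n : Nat), ∀ s ∈ seen, pvMsr a1 a2 s < n → pvW a1 a2 s = false by
    exact fun s hs => h (pvMsr a1 a2 s + 1) s hs (by omega)
  intro n
  induction n with
  | zero => intro s _ h; omega
  | succ n ih =>
    intro s hs hlt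
    unfold pvW
    simp only [pvWin]
    rw [Bool.or_eq_false_iff]
    refine ⟨by simp [(H s hs).1], ?_⟩
    rw [List.any_eq_false]
    intro t htm
    have hm := pvSuccs_msr a1 a2 s t htm
    rw [pvWin_stable a1 a2 _ t (by omega)]
    simp [ih t ((H s hs).2 t htm) (by omega : pvMsr a1 a2 t < n)]

theorem pvAnyCongrMem {α : Type} {l : List α} {f g : α → Bool}
    (h : ∀ x ∈ l, f x = g x) : l.any f = l.any g := by
  induction l with
  | nil => rfl
  | cons x l ih =>
    simp only [List.any_cons]
    rw [h x List.mem_cons_self, ih (fun y hy => h y (List.mem_cons_of_mem _ hy))]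

theorem pvW_eq (a1 a2 : List Char) (s : Nat × Nat × Int) :
    pvW a1 a2 s = (decide (s.1 = a1.length ∧ s.2.1 = a2.length ∧ s.2.2 = 0)
      || (pvSuccs a1 a2 s).any (pvW a1 a2)) := by
  have h1 : pvW a1 a2 s = (decide (s.1 = a1.length ∧ s.2.1 = a2.length ∧ s.2.2 = 0)
      || (pvSuccs a1 a2 s).any (pvWin a1 a2 (pvMsr a1 a2 s))) := rfl
  rw [h1]
  congr 1
  exact pvAnyCongrMem (fun t ht => pvWin_stable a1 a2 (pvMsr a1 a2 s) t (pvSuccs_msr a1 a2 s t ht))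

-- ---- A's pushed successor list (in A's order) and its relation to B's succs ----

def pvSuccsA (a1 a2 : List Char) (i j : Nat) (diff : Int) : List (Nat × Nat × Int) :=
  if diff = 0 then
    (if i < a1.length ∧ j < a2.length ∧ PySem.Chars.isalpha (a1.getD i ' ')
        ∧ PySem.Chars.isalpha (a2.getD j ' ') ∧ a1.getD i ' ' = a2.getD j ' ' then
       [(i + 1, j + 1, (0 : Int))] else [])
    ++ (pvNums a1 i a1.length).map (fun p => (p.1, j, diff + p.2))
    ++ (pvNums a2 j a2.length).map (fun p => (i, p.1, diff - p.2))
  else if diff > 0 then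
    (if j < a2.length ∧ PySem.Chars.isalpha (a2.getD j ' ') then [(i, j + 1, diff - 1)] else [])
    ++ (pvNums a2 j a2.length).map (fun p => (i, p.1, diff - p.2))
  else
    (if i < a1.length ∧ PySem.Chars.isalpha (a1.getD i ' ') then [(i + 1, j, diff + 1)] else [])
    ++ (pvNums a1 i a1.length).map (fun p => (p.1, j, diff + p.2))

theorem pvSuccsA_mem (a1 a2 : List Char) (i j : Nat) (diff : Int) (x : Nat × Nat × Int) :
    x ∈ pvSuccsA a1 a2 i j diff ↔ x ∈ pvSuccs a1 a2 (i, j, diff) := by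
  unfold pvSuccsA pvSuccs
  simp only
  rcases lt_trichotomy diff 0 with h | h | h
  · rw [if_neg (show ¬ diff = 0 by omega), if_neg (show ¬ diff > 0 by omega),
      if_neg (show ¬(diff = 0 ∧ i < a1.length ∧ j < a2.length
          ∧ PySem.Chars.isalpha (a1.getD i ' ') = true ∧ PySem.Chars.isalpha (a2.getD j ' ') = true
          ∧ a1.getD i ' ' = a2.getD j ' ') from fun hc => absurd hc.1 (by omega)),
      if_neg (show ¬(diff > 0 ∧ j < a2.length ∧ PySem.Chars.isalpha (a2.getD j ' ') = true)
          from fun hc => absurd hc.1 (by omega)),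
      if_neg (show ¬ diff ≥ 0 by omega), if_pos (show diff ≤ 0 by omega)]
    by_cases hg : i < a1.length ∧ PySem.Chars.isalpha (a1.getD i ' ') = true
    · rw [if_pos hg, if_pos ⟨h, hg.1, hg.2⟩]
      simp only [List.mem_append, List.nil_append, List.append_nil, List.not_mem_nil]
      try tauto
    · rw [if_neg hg, if_neg (show ¬(diff < 0 ∧ i < a1.length
          ∧ PySem.Chars.isalpha (a1.getD i ' ') = true) from fun hc => hg ⟨hc.2.1, hc.2.2⟩)]
      simp only [List.mem_append, List.nil_append, List.append_nil, List.not_mem_nil]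
      try tauto
  · subst h
    rw [if_pos rfl,
      if_neg (show ¬((0:Int) > 0 ∧ j < a2.length ∧ PySem.Chars.isalpha (a2.getD j ' ') = true)
          from fun hc => absurd hc.1 (by omega)),
      if_neg (show ¬((0:Int) < 0 ∧ i < a1.length ∧ PySem.Chars.isalpha (a1.getD i ' ') = true)
          from fun hc => absurd hc.1 (by omega)),
      if_pos (show (0:Int) ≥ 0 by omega), if_pos (show (0:Int) ≤ 0 by omega)]
    by_cases hg : i < a1.length ∧ j < a2.length ∧ PySem.Chars.isalpha (a1.getD i ' ') = true
        ∧ PySem.Chars.isalpha (a2.getD j ' ') = true ∧ a1.getD i ' ' = a2.getD j ' '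
    · rw [if_pos hg, if_pos ⟨rfl, hg⟩]
      simp only [List.mem_append, List.nil_append, List.append_nil, List.not_mem_nil]
      try tauto
    · rw [if_neg hg, if_neg (show ¬((0:Int) = 0 ∧ i < a1.length ∧ j < a2.length
          ∧ PySem.Chars.isalpha (a1.getD i ' ') = true ∧ PySem.Chars.isalpha (a2.getD j ' ') = true
          ∧ a1.getD i ' ' = a2.getD j ' ') from fun hc => hg hc.2)]
      simp only [List.mem_append, List.nil_append, List.append_nil, List.not_mem_nil]
      try tauto
  · rw [if_neg (show ¬ diff = 0 by omega), if_pos (show diff > 0 by omega),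
      if_neg (show ¬(diff = 0 ∧ i < a1.length ∧ j < a2.length
          ∧ PySem.Chars.isalpha (a1.getD i ' ') = true ∧ PySem.Chars.isalpha (a2.getD j ' ') = true
          ∧ a1.getD i ' ' = a2.getD j ' ') from fun hc => absurd hc.1 (by omega)),
      if_neg (show ¬(diff < 0 ∧ i < a1.length ∧ PySem.Chars.isalpha (a1.getD i ' ') = true)
          from fun hc => absurd hc.1 (by omega)),
      if_pos (show diff ≥ 0 by omega), if_neg (show ¬ diff ≤ 0 by omega)]
    by_cases hg : j < a2.length ∧ PySem.Chars.isalpha (a2.getD j ' ') = true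
    · rw [if_pos hg, if_pos ⟨h, hg.1, hg.2⟩]
      simp only [List.mem_append, List.nil_append, List.append_nil, List.not_mem_nil]
      try tauto
    · rw [if_neg hg, if_neg (show ¬(diff > 0 ∧ j < a2.length
          ∧ PySem.Chars.isalpha (a2.getD j ' ') = true) from fun hc => hg ⟨hc.2.1, hc.2.2⟩)]
      simp only [List.mem_append, List.nil_append, List.append_nil, List.not_mem_nil]
      try tauto

-- ---- A side: the BFS computes pvW of the start state ----

def pvFoldPush (sd : PySem.Set (Nat × Nat × Int) × List (Nat × Nat × Int))
    (l : List (Nat × Nat × Int)) : PySem.Set (Nat × Nat × Int) × List (Nat × Nat × Int) :=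
  l.foldl (fun sd t => pvPush sd.1 sd.2 t) sd

theorem pvFoldPush_facts :
    ∀ (l : List (Nat × Nat × Int)) (seen : PySem.Set (Nat × Nat × Int))
      (q : List (Nat × Nat × Int)), seen.Nodup →
    (∀ x, x ∈ (pvFoldPush (seen, q) l).1 ↔ x ∈ seen ∨ x ∈ l) ∧
    (pvFoldPush (seen, q) l).2.length + seen.length = q.length + (pvFoldPush (seen, q) l).1.length ∧
    (∀ x ∈ (pvFoldPush (seen, q) l).2, x ∈ q ∨ x ∈ l) ∧
    (pvFoldPush (seen, q) l).1.Nodup ∧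
    (∀ x ∈ q, x ∈ (pvFoldPush (seen, q) l).2) ∧
    (∀ x ∈ (pvFoldPush (seen, q) l).1, x ∈ seen ∨ x ∈ (pvFoldPush (seen, q) l).2) := by
  intro l
  induction l with
  | nil =>
    intro seen q hnd
    refine ⟨by simp [pvFoldPush], by simp [pvFoldPush], by simp [pvFoldPush], by simpa [pvFoldPush] using hnd, by simp [pvFoldPush], by intro x hx; exact Or.inl hx⟩
  | cons t l ih =>
    intro seen q hnd
    by_cases hc : t ∈ seen
    · have hpush : pvPush seen q t = (seen, q) := by
        unfold pvPush
        rw [if_pos ((PySem.Set.contains_iff seen t).mpr hc)]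
      have hstep : pvFoldPush (seen, q) (t :: l) = pvFoldPush (seen, q) l := by
        simp [pvFoldPush, List.foldl_cons, hpush]
      obtain ⟨f1, f2, f3, f4, f5, f6⟩ := ih seen q hnd
      rw [hstep]
      refine ⟨?_, f2, ?_, f4, f5, f6⟩
      · intro x
        rw [f1]
        simp only [List.mem_cons]
        constructor
        · tauto
        · rintro (h | rfl | h) <;> tauto
      · intro x hx
        rcases f3 x hx with h | h
        · exact Or.inl h
        · exact Or.inr (List.mem_cons_of_mem _ h)
    · have hpush : pvPush seen q t = (seen ++ [t], q ++ [t]) := by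
        unfold pvPush
        rw [if_neg (by simp [hc]), PySem.Set.add_of_not_mem hc]
      have hnd' : (seen ++ [t]).Nodup := by
        have h := PySem.Set.nodup_add (s := seen) (x := t) hnd
        rwa [PySem.Set.add_of_not_mem hc] at h
      have hstep : pvFoldPush (seen, q) (t :: l) = pvFoldPush (seen ++ [t], q ++ [t]) l := by
        simp [pvFoldPush, List.foldl_cons, hpush]
      obtain ⟨f1, f2, f3, f4, f5, f6⟩ := ih (seen ++ [t]) (q ++ [t]) hnd'
      rw [hstep]
      refine ⟨?_, ?_, ?_, f4, ?_, ?_⟩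
      · intro x
        rw [f1]
        simp only [List.mem_append, List.mem_cons]
        tauto
      · simp only [List.length_append, List.length_singleton] at f2 ⊢
        omega
      · intro x hx
        rcases f3 x hx with h | h
        · rcases List.mem_append.mp h with h | h
          · exact Or.inl h
          · exact Or.inr (by simp only [List.mem_singleton] at h; simp [h])
        · exact Or.inr (List.mem_cons_of_mem _ h)
      · intro x hx
        exact f5 x (by simp [hx])
      · intro x hx
        rcases f6 x hx with h | h
        · rcases List.mem_append.mp h with h | h
          · exact Or.inl h
          · simp only [List.mem_singleton] at h
            subst h
            exact Or.inr (f5 x (by simp))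
        · exact Or.inr h

theorem pvALoop_eq (a : List Char) (mk : Nat → Int → Nat × Nat × Int) :
    ∀ (m k stop : Nat) (num : Int) (sd : PySem.Set (Nat × Nat × Int) × List (Nat × Nat × Int)),
      stop - k = m →
      pvALoop a mk k stop num sd = pvFoldPush sd ((pvNumLoop a k stop num).map (fun p => mk p.1 p.2)) := by
  intro m
  induction m with
  | zero =>
    intro k stop num sd hm
    rw [pvALoop, pvNumLoop]
    simp [show ¬ k < stop by omega, pvFoldPush]
  | succ m ih =>
    intro k stop num sd hm
    have hk : k < stop := by omega
    rw [pvALoop, pvNumLoop]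
    simp only [hk, dite_true]
    by_cases hd : PySem.Chars.isdigit (a.getD k ' ') = true
    · rw [if_pos hd, if_pos hd]
      rw [ih (k+1) stop _ _ (by omega)]
      rfl
    · rw [if_neg hd, if_neg hd]
      rfl

theorem pvFoldPush_append (sd : PySem.Set (Nat × Nat × Int) × List (Nat × Nat × Int))
    (l1 l2 : List (Nat × Nat × Int)) :
    pvFoldPush sd (l1 ++ l2) = pvFoldPush (pvFoldPush sd l1) l2 := by
  simp [pvFoldPush, List.foldl_append]

theorem pvStep_eq (a1 a2 : List Char) (i j : Nat) (diff : Int)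
    (seen : PySem.Set (Nat × Nat × Int)) (q : List (Nat × Nat × Int)) :
    pvStep a1 a2 i j diff seen q = pvFoldPush (seen, q) (pvSuccsA a1 a2 i j diff) := by
  have hload1 : ∀ (sd : PySem.Set (Nat × Nat × Int) × List (Nat × Nat × Int)) (jj : Nat) (d : Int),
      (if i < a1.length ∧ PySem.Chars.isdigit (a1.getD i ' ') then
        pvALoop a1 (fun k1 n => (k1, jj, d + n)) i (min a1.length (i+3)) 0 sd else sd) =
      pvFoldPush sd ((pvNums a1 i a1.length).map (fun p => (p.1, jj, d + p.2))) := by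
    intro sd jj d
    unfold pvNums
    split_ifs with h
    · exact pvALoop_eq a1 _ _ i (min a1.length (i+3)) 0 sd rfl
    · rfl
  have hload2 : ∀ (sd : PySem.Set (Nat × Nat × Int) × List (Nat × Nat × Int)) (ii : Nat) (d : Int),
      (if j < a2.length ∧ PySem.Chars.isdigit (a2.getD j ' ') then
        pvALoop a2 (fun k1 n => (ii, k1, d - n)) j (min a2.length (j+3)) 0 sd else sd) =
      pvFoldPush sd ((pvNums a2 j a2.length).map (fun p => (ii, p.1, d - p.2))) := by
    intro sd ii d
    unfold pvNums
    split_ifs with h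
    · exact pvALoop_eq a2 _ _ j (min a2.length (j+3)) 0 sd rfl
    · rfl
  unfold pvStep pvSuccsA
  simp only
  by_cases h0 : diff = 0
  · rw [if_pos h0, if_pos h0]
    rw [hload1, hload2, pvFoldPush_append, pvFoldPush_append]
    congr 1
    congr 1
    by_cases hG : i < a1.length ∧ j < a2.length ∧ PySem.Chars.isalpha (a1.getD i ' ') = true
        ∧ PySem.Chars.isalpha (a2.getD j ' ') = true
    · rw [if_pos hG]
      by_cases hE : a1.getD i ' ' = a2.getD j ' '
      · rw [if_pos hE, if_pos ⟨hG.1, hG.2.1, hG.2.2.1, hG.2.2.2, hE⟩]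
        rfl
      · rw [if_neg hE, if_neg (fun h5 => hE h5.2.2.2.2)]
        rfl
    · rw [if_neg hG, if_neg (fun h5 => hG ⟨h5.1, h5.2.1, h5.2.2.1, h5.2.2.2.1⟩)]
      rfl
  · rw [if_neg h0, if_neg h0]
    by_cases hp : diff > 0
    · rw [if_pos hp, if_pos hp]
      rw [hload2, pvFoldPush_append]
      congr 1
      split_ifs with hA <;> rfl
    · rw [if_neg hp, if_neg hp]
      rw [hload1, pvFoldPush_append]
      congr 1
      split_ifs with hA <;> rfl

theorem pvSeenBound (a1 a2 : List Char) (seen : List (Nat × Nat × Int))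
    (hnd : seen.Nodup) (hsp : ∀ s ∈ seen, pvInSpace a1 a2 s) :
    seen.length ≤ (a1.length + 1) * (a2.length + 1) * 1999 := by
  classical
  have hsub : seen.toFinset ⊆
      (Finset.range (a1.length + 1)) ×ˢ ((Finset.range (a2.length + 1)) ×ˢ (Finset.Icc (-999 : Int) 999)) := by
    intro x hx
    obtain ⟨h1, h2, h3, h4⟩ := hsp x (List.mem_toFinset.mp hx)
    simp only [Finset.mem_product, Finset.mem_range, Finset.mem_Icc]
    exact ⟨by omega, by omega, h3, h4⟩
  have hcard := Finset.card_le_card hsub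
  rw [List.toFinset_card_of_nodup hnd] at hcard
  simp only [Finset.card_product, Finset.card_range, Int.card_Icc] at hcard
  norm_num at hcard
  calc seen.length ≤ (a1.length + 1) * ((a2.length + 1) * 1999) := hcard
    _ = (a1.length + 1) * (a2.length + 1) * 1999 := by ring

theorem pvBFS_correct (a1 a2 : List Char) :
    ∀ (fuel : Nat) (dq : List (Nat × Nat × Int)) (seen : PySem.Set (Nat × Nat × Int)),
      (∀ s ∈ seen, s ∈ dq ∨ (¬(s.1 = a1.length ∧ s.2.1 = a2.length ∧ s.2.2 = 0) ∧
          ∀ t ∈ pvSuccs a1 a2 s, t ∈ seen)) →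
      (∀ s ∈ dq, s ∈ seen) →
      (∀ s ∈ seen, pvInSpace a1 a2 s) →
      seen.Nodup →
      dq.length + (a1.length + 1) * (a2.length + 1) * 1999 ≤ fuel + seen.length →
      (pvBFS a1 a2 fuel dq seen = true ↔ ∃ s ∈ seen, pvW a1 a2 s = true) := by
  intro fuel
  induction fuel with
  | zero =>
    intro dq seen I1 I2 I3 I4 hf
    have hb := pvSeenBound a1 a2 seen I4 I3
    have hdq : dq = [] := List.length_eq_zero_iff.mp (by omega)
    subst hdq
    simp only [pvBFS, Bool.false_eq_true, false_iff]
    rintro ⟨s, hs, hw⟩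
    have := pvNoWin a1 a2 seen (fun s hs => by
      rcases I1 s hs with h | h
      · exact absurd h (List.not_mem_nil)
      · exact h) s hs
    rw [this] at hw
    exact Bool.false_ne_true hw
  | succ fuel ih =>
    intro dq seen I1 I2 I3 I4 hf
    match dq with
    | [] =>
      simp only [pvBFS, Bool.false_eq_true, false_iff]
      rintro ⟨s, hs, hw⟩
      have := pvNoWin a1 a2 seen (fun s hs => by
        rcases I1 s hs with h | h
        · exact absurd h (List.not_mem_nil)
        · exact h) s hs
      rw [this] at hw
      exact Bool.false_ne_true hw
    | (i, j, diff) :: rest =>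
      show (if i = a1.length ∧ j = a2.length ∧ diff = 0 then true
            else pvBFS a1 a2 fuel (pvStep a1 a2 i j diff seen rest).2 (pvStep a1 a2 i j diff seen rest).1) = true
          ↔ _
      by_cases hacc : i = a1.length ∧ j = a2.length ∧ diff = 0
      · rw [if_pos hacc]
        simp only [true_iff]
        refine ⟨(i, j, diff), I2 _ (List.mem_cons_self), ?_⟩
        unfold pvW
        simp only [pvWin]
        simp [hacc]
      · rw [if_neg hacc, pvStep_eq]
        obtain ⟨f1, f2, f3, f4, f5, f6⟩ :=
          pvFoldPush_facts (pvSuccsA a1 a2 i j diff) seen rest I4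
        set r := pvFoldPush (seen, rest) (pvSuccsA a1 a2 i j diff) with hr
        have hsseen : (i, j, diff) ∈ seen := I2 _ List.mem_cons_self
        have hIH := ih r.2 r.1
          (by -- I1'
            intro s hs
            rcases f6 s hs with hso | hsq
            · rcases I1 s hso with hdq | hcl
              · rcases List.mem_cons.mp hdq with rfl | hrest
                · exact Or.inr ⟨hacc, fun t htm =>
                    (f1 t).mpr (Or.inr ((pvSuccsA_mem a1 a2 i j diff t).mpr htm))⟩
                · exact Or.inl (f5 s hrest)
              · exact Or.inr ⟨hcl.1, fun t htm => (f1 t).mpr (Or.inl (hcl.2 t htm))⟩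
            · exact Or.inl hsq)
          (by -- I2'
            intro s hs
            rcases f3 s hs with h | h
            · exact (f1 s).mpr (Or.inl (I2 s (List.mem_cons_of_mem _ h)))
            · exact (f1 s).mpr (Or.inr h))
          (by -- I3'
            intro s hs
            rcases (f1 s).mp hs with h | h
            · exact I3 s h
            · exact pvSuccs_space a1 a2 _ s (I3 _ hsseen) ((pvSuccsA_mem a1 a2 i j diff s).mp h))
          f4
          (by
            simp only [List.length_cons] at hf
            omega)
        rw [hIH]
        constructor
        · rintro ⟨s, hs, hw⟩
          rcases (f1 s).mp hs with h | h
          · exact ⟨s, h, hw⟩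
          · refine ⟨(i, j, diff), hsseen, ?_⟩
            have hB := (pvSuccsA_mem a1 a2 i j diff s).mp h
            unfold pvW
            simp only [pvWin]
            rw [Bool.or_eq_true]
            refine Or.inr ?_
            rw [List.any_eq_true]
            refine ⟨s, hB, ?_⟩
            rw [pvWin_stable a1 a2 _ s (pvSuccs_msr a1 a2 _ s hB)]
            exact hw
        · rintro ⟨s, hs, hw⟩
          exact ⟨s, (f1 s).mpr (Or.inl hs), hw⟩

theorem pvA_eq (s1 s2 : String) :
    possiblyEquals s1 s2 = pvW s1.toList s2.toList (0, 0, 0) := by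
  unfold possiblyEquals
  simp only
  have hseen0 : PySem.Set.add (PySem.Set.empty) ((0:Nat), (0:Nat), (0:Int)) = [((0:Nat), (0:Nat), (0:Int))] := rfl
  rw [hseen0]
  have h := pvBFS_correct s1.toList s2.toList
    ((s1.toList.length + 1) * (s2.toList.length + 1) * 1999)
    [(0, 0, 0)] [(0, 0, 0)]
    (fun s hs => Or.inl hs)
    (fun s hs => hs)
    (by
      intro s hs
      rw [List.mem_singleton] at hs
      subst hs
      exact ⟨Nat.zero_le _, Nat.zero_le _, by norm_num, by norm_num⟩)
    (List.nodup_singleton _)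
    (by omega)
  cases hw : pvW s1.toList s2.toList (0, 0, 0) with
  | true => exact h.mpr ⟨(0, 0, 0), List.mem_singleton_self _, hw⟩
  | false =>
    rw [← Bool.not_eq_true]
    rw [h]
    rintro ⟨s, hs, hw'⟩
    rw [List.mem_singleton] at hs
    subst hs
    rw [hw] at hw'
    exact Bool.false_ne_true hw'

-- ---- B side: the level sweep computes pvW of the start state ----

theorem pvBucketAdd_length (lv : List (PySem.Set (Nat × Nat × Int))) :
    ∀ (L : Nat) (t : Nat × Nat × Int), (pvBucketAdd lv L t).length = lv.length := by
  induction lv with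
  | nil => intro L t; rfl
  | cons s rest ih =>
    intro L t
    cases L with
    | zero => rfl
    | succ L => simp [pvBucketAdd, ih]

theorem pvBucketAdd_getD (lv : List (PySem.Set (Nat × Nat × Int))) :
    ∀ (L : Nat) (t : Nat × Nat × Int) (ℓ : Nat),
      (pvBucketAdd lv L t).getD ℓ PySem.Set.empty =
        if ℓ = L ∧ L < lv.length then PySem.Set.add (lv.getD ℓ PySem.Set.empty) t
        else lv.getD ℓ PySem.Set.empty := by
  induction lv with
  | nil =>
    intro L t ℓ
    rw [if_neg (by simp)]
    rfl
  | cons s rest ih =>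
    intro L t ℓ
    cases L with
    | zero =>
      cases ℓ with
      | zero => simp [pvBucketAdd]
      | succ ℓ => simp [pvBucketAdd]
    | succ L =>
      cases ℓ with
      | zero => simp [pvBucketAdd]
      | succ ℓ =>
        simp only [pvBucketAdd, List.getD_cons_succ, List.length_cons]
        rw [ih L t ℓ]
        by_cases h : ℓ = L ∧ L < rest.length
        · rw [if_pos h, if_pos ⟨by omega, by omega⟩]
        · rw [if_neg h, if_neg (by omega)]

theorem pvBucketAdd_mem (lv : List (PySem.Set (Nat × Nat × Int))) (L : Nat) (t : Nat × Nat × Int)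
    (ℓ : Nat) (x : Nat × Nat × Int) :
    x ∈ (pvBucketAdd lv L t).getD ℓ PySem.Set.empty ↔
      x ∈ lv.getD ℓ PySem.Set.empty ∨ (x = t ∧ ℓ = L ∧ L < lv.length) := by
  rw [pvBucketAdd_getD]
  by_cases h : ℓ = L ∧ L < lv.length
  · rw [if_pos h, PySem.Set.mem_add]
    tauto
  · rw [if_neg h]
    tauto

theorem pvGetD_of_ge (lv : List (PySem.Set (Nat × Nat × Int))) (ℓ : Nat) (h : lv.length ≤ ℓ) :
    lv.getD ℓ PySem.Set.empty = PySem.Set.empty := by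
  rw [List.getD_eq_getElem?_getD, List.getElem?_eq_none (by omega)]
  rfl

-- the forward sweep's invariants
def pvGood (a1 a2 : List Char) (s : Nat × Nat × Int) : Prop :=
  s.1 ≤ a1.length ∧ s.2.1 ≤ a2.length

def pvWL (a1 a2 : List Char) (lv : List (PySem.Set (Nat × Nat × Int))) : Prop :=
  ∀ ℓ, ∀ st ∈ lv.getD ℓ PySem.Set.empty, st.1 + st.2.1 = ℓ ∧ pvGood a1 a2 st

theorem pvAddAll_facts (ts : List (Nat × Nat × Int)) :
    ∀ (lv : List (PySem.Set (Nat × Nat × Int))),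
      (∀ t ∈ ts, t.1 + t.2.1 < lv.length) →
      (ts.foldl (fun lv'' t => pvBucketAdd lv'' (t.1 + t.2.1) t) lv).length = lv.length ∧
      (∀ ℓ x, x ∈ (ts.foldl (fun lv'' t => pvBucketAdd lv'' (t.1 + t.2.1) t) lv).getD ℓ PySem.Set.empty ↔
        x ∈ lv.getD ℓ PySem.Set.empty ∨ (x ∈ ts ∧ ℓ = x.1 + x.2.1)) := by
  induction ts with
  | nil => intro lv _; exact ⟨rfl, by simp⟩
  | cons t ts ih =>
    intro lv hbd
    have hlen : (pvBucketAdd lv (t.1 + t.2.1) t).length = lv.length := pvBucketAdd_length lv _ _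
    obtain ⟨g1, g2⟩ := ih (pvBucketAdd lv (t.1 + t.2.1) t)
      (fun u hu => by rw [hlen]; exact hbd u (List.mem_cons_of_mem _ hu))
    refine ⟨by simp only [List.foldl_cons]; rw [g1, hlen], ?_⟩
    intro ℓ x
    simp only [List.foldl_cons]
    rw [g2 ℓ x, pvBucketAdd_mem]
    simp only [List.mem_cons]
    constructor
    · rintro ((h | ⟨rfl, rfl, -⟩) | h)
      · exact Or.inl h
      · exact Or.inr ⟨Or.inl rfl, rfl⟩
      · exact Or.inr ⟨Or.inr h.1, h.2⟩
    · rintro (h | ⟨(rfl | h), hx⟩)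
      · exact Or.inl (Or.inl h)
      · exact Or.inl (Or.inr ⟨rfl, hx, hbd x List.mem_cons_self⟩)
      · exact Or.inr ⟨h, hx⟩

theorem pvBucketFold_facts (a1 a2 : List Char) (S : List (Nat × Nat × Int)) :
    ∀ (lv : List (PySem.Set (Nat × Nat × Int))),
      (∀ st ∈ S, ∀ t ∈ pvSuccs a1 a2 st, t.1 + t.2.1 < lv.length) →
      (S.foldl (fun lv' st => (pvSuccs a1 a2 st).foldl
          (fun lv'' t => pvBucketAdd lv'' (t.1 + t.2.1) t) lv') lv).length = lv.length ∧
      (∀ ℓ x, x ∈ (S.foldl (fun lv' st => (pvSuccs a1 a2 st).foldl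
          (fun lv'' t => pvBucketAdd lv'' (t.1 + t.2.1) t) lv') lv).getD ℓ PySem.Set.empty ↔
        x ∈ lv.getD ℓ PySem.Set.empty ∨ ∃ st ∈ S, x ∈ pvSuccs a1 a2 st ∧ ℓ = x.1 + x.2.1) := by
  induction S with
  | nil => intro lv _; exact ⟨rfl, by simp⟩
  | cons st S ih =>
    intro lv hbd
    obtain ⟨a1', a2'⟩ := pvAddAll_facts (pvSuccs a1 a2 st) lv
      (fun t ht => hbd st List.mem_cons_self t ht)
    set lv1 := (pvSuccs a1 a2 st).foldl (fun lv'' t => pvBucketAdd lv'' (t.1 + t.2.1) t) lv with hlv1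
    obtain ⟨g1, g2⟩ := ih lv1
      (fun u hu t ht => by rw [a1']; exact hbd u (List.mem_cons_of_mem _ hu) t ht)
    refine ⟨by simp only [List.foldl_cons]; rw [g1, a1'], ?_⟩
    intro ℓ x
    simp only [List.foldl_cons]
    rw [g2 ℓ x, a2' ℓ x]
    simp only [List.mem_cons]
    constructor
    · rintro ((h | ⟨hx, rfl⟩) | ⟨u, hu, hx, rfl⟩)
      · exact Or.inl h
      · exact Or.inr ⟨st, Or.inl rfl, hx, rfl⟩
      · exact Or.inr ⟨u, Or.inr hu, hx, rfl⟩
    · rintro (h | ⟨u, (rfl | hu), hx, rfl⟩)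
      · exact Or.inl (Or.inl h)
      · exact Or.inl (Or.inr ⟨hx, rfl⟩)
      · exact Or.inr ⟨u, hu, hx, rfl⟩

-- one outer iteration of the forward sweep
def pvFwdStep (a1 a2 : List Char) (lv : List (PySem.Set (Nat × Nat × Int))) (L : Nat) :
    List (PySem.Set (Nat × Nat × Int)) :=
  (lv.getD L PySem.Set.empty).foldl (fun lv' st =>
    (pvSuccs a1 a2 st).foldl (fun lv'' t => pvBucketAdd lv'' (t.1 + t.2.1) t) lv') lv

def pvFwdInv (a1 a2 : List Char) (L : Nat) (lv : List (PySem.Set (Nat × Nat × Int))) : Prop :=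
  lv.length = a1.length + a2.length + 1 ∧
  pvWL a1 a2 lv ∧
  ((0, 0, 0) : Nat × Nat × Int) ∈ lv.getD 0 PySem.Set.empty ∧
  (∀ ℓ < L, ∀ st ∈ lv.getD ℓ PySem.Set.empty, ∀ t ∈ pvSuccs a1 a2 st,
    t ∈ lv.getD (t.1 + t.2.1) PySem.Set.empty)

theorem pvFwdStep_inv (a1 a2 : List Char) (L : Nat) (lv : List (PySem.Set (Nat × Nat × Int)))
    (h : pvFwdInv a1 a2 L lv) : pvFwdInv a1 a2 (L + 1) (pvFwdStep a1 a2 lv L) := by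
  obtain ⟨hlen, hwl, hstart, hcl⟩ := h
  have hsbd : ∀ st ∈ lv.getD L PySem.Set.empty, ∀ t ∈ pvSuccs a1 a2 st, t.1 + t.2.1 < lv.length := by
    intro st hst t ht
    obtain ⟨-, hg⟩ := hwl L st hst
    obtain ⟨-, hb1, hb2⟩ := pvSuccs_key a1 a2 st t ht hg.1 hg.2
    omega
  obtain ⟨g1, g2⟩ := pvBucketFold_facts a1 a2 (lv.getD L PySem.Set.empty) lv hsbd
  have hkey : ∀ st ∈ lv.getD L PySem.Set.empty, ∀ t ∈ pvSuccs a1 a2 st, L < t.1 + t.2.1 := by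
    intro st hst t ht
    obtain ⟨hl, hg⟩ := hwl L st hst
    obtain ⟨hk, -⟩ := pvSuccs_key a1 a2 st t ht hg.1 hg.2
    omega
  have hnew : ∀ ℓ x, x ∈ (pvFwdStep a1 a2 lv L).getD ℓ PySem.Set.empty ↔
      x ∈ lv.getD ℓ PySem.Set.empty ∨
        ∃ st ∈ lv.getD L PySem.Set.empty, x ∈ pvSuccs a1 a2 st ∧ ℓ = x.1 + x.2.1 := g2
  refine ⟨by rw [(show (pvFwdStep a1 a2 lv L) = _ from rfl)]; exact g1.trans hlen, ?_, ?_, ?_⟩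
  · -- well-leveled
    intro ℓ st hst
    rcases (hnew ℓ st).mp hst with h | ⟨u, hu, hx, rfl⟩
    · exact hwl ℓ st h
    · obtain ⟨-, hg⟩ := hwl L u hu
      obtain ⟨-, hb1, hb2⟩ := pvSuccs_key a1 a2 u st hx hg.1 hg.2
      exact ⟨rfl, hb1, hb2⟩
  · exact (hnew 0 _).mpr (Or.inl hstart)
  · -- closure up to L+1
    intro ℓ hℓ st hst t ht
    by_cases hcase : ℓ = L
    · subst hcase
      -- bucket ℓ is unchanged at indices ≤ L
      have hstold : st ∈ lv.getD ℓ PySem.Set.empty := by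
        rcases (hnew ℓ st).mp hst with h | ⟨u, hu, hx, hlev⟩
        · exact h
        · exact absurd (hlev ▸ hkey u hu st hx) (by omega)
      exact (hnew (t.1 + t.2.1) t).mpr (Or.inr ⟨st, hstold, ht, rfl⟩)
    · have hℓ' : ℓ < L := by omega
      have hstold : st ∈ lv.getD ℓ PySem.Set.empty := by
        rcases (hnew ℓ st).mp hst with h | ⟨u, hu, hx, hlev⟩
        · exact h
        · exact absurd (hlev ▸ hkey u hu st hx) (by omega)
      exact (hnew (t.1 + t.2.1) t).mpr (Or.inl (hcl ℓ hℓ' st hstold t ht))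

theorem pvForward_inv (a1 a2 : List Char) :
    ∀ (M : Nat) (lv : List (PySem.Set (Nat × Nat × Int))), pvFwdInv a1 a2 0 lv →
      pvFwdInv a1 a2 M ((List.range M).foldl (fun lv L => pvFwdStep a1 a2 lv L) lv) := by
  intro M
  induction M with
  | zero => intro lv h; simpa using h
  | succ M ih =>
    intro lv h
    rw [List.range_succ, List.foldl_append]
    have hM := ih lv h
    have := pvFwdStep_inv a1 a2 M _ hM
    simpa using this

-- the backward sweep
def pvBwdIns (a1 a2 : List Char) (w : PySem.Dict (Nat × Nat × Int) Bool) (st : Nat × Nat × Int) :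
    PySem.Dict (Nat × Nat × Int) Bool :=
  w.insert st (decide (st.1 = a1.length ∧ st.2.1 = a2.length ∧ st.2.2 = 0)
    || (pvSuccs a1 a2 st).any (fun t => w.getD t false))

def pvInv (a1 a2 : List Char) (w : PySem.Dict (Nat × Nat × Int) Bool) : Prop :=
  ∀ st b, w.get? st = some b → b = pvW a1 a2 st

theorem pvBwdLevel (a1 a2 : List Char) (S : List (Nat × Nat × Int)) :
    ∀ (w : PySem.Dict (Nat × Nat × Int) Bool), pvInv a1 a2 w →
      (∀ st ∈ S, ∀ t ∈ pvSuccs a1 a2 st, w.contains t = true) →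
      pvInv a1 a2 (S.foldl (pvBwdIns a1 a2) w) ∧
      (∀ x, w.contains x = true → (S.foldl (pvBwdIns a1 a2) w).contains x = true) ∧
      (∀ st ∈ S, (S.foldl (pvBwdIns a1 a2) w).contains st = true) := by
  induction S with
  | nil => intro w hInv _; exact ⟨hInv, fun x hx => hx, by simp⟩
  | cons st S ih =>
    intro w hInv hsucc
    have hall : ∀ t ∈ pvSuccs a1 a2 st, w.getD t false = pvW a1 a2 t := by
      intro t ht
      have hmem : w.contains t = true := hsucc st List.mem_cons_self t ht
      have hsome : (w.get? t).isSome = true := by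
        rw [PySem.Dict.contains_eq_isSome_get?] at hmem
        exact hmem
      obtain ⟨b, hb⟩ := Option.isSome_iff_exists.mp hsome
      rw [PySem.Dict.getD_eq_get?_getD, hb, Option.getD_some, hInv t b hb]
    have hval : (decide (st.1 = a1.length ∧ st.2.1 = a2.length ∧ st.2.2 = 0)
        || (pvSuccs a1 a2 st).any (fun t => w.getD t false)) = pvW a1 a2 st := by
      rw [pvW_eq]
      congr 1
      exact pvAnyCongrMem hall
    have hInv1 : pvInv a1 a2 (pvBwdIns a1 a2 w st) := by
      intro s b hb
      unfold pvBwdIns at hb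
      rw [PySem.Dict.get?_insert] at hb
      by_cases hss : s = st
      · rw [if_pos hss] at hb
        cases hb
        rw [hss, hval]
      · rw [if_neg hss] at hb
        exact hInv s b hb
    have hmono1 : ∀ x, w.contains x = true → (pvBwdIns a1 a2 w st).contains x = true := by
      intro x hx
      unfold pvBwdIns
      rw [PySem.Dict.contains_insert, hx, Bool.or_true]
    obtain ⟨g1, g2, g3⟩ := ih (pvBwdIns a1 a2 w st) hInv1
      (fun u hu t ht => hmono1 t (hsucc u (List.mem_cons_of_mem _ hu) t ht))
    refine ⟨by simpa [List.foldl_cons] using g1, ?_, ?_⟩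
    · intro x hx
      simpa [List.foldl_cons] using g2 x (hmono1 x hx)
    · intro u hu
      rcases List.mem_cons.mp hu with rfl | hu
      · simpa [List.foldl_cons] using g2 u (by
          unfold pvBwdIns
          exact PySem.Dict.contains_insert_self w _ _)
      · simpa [List.foldl_cons] using g3 u hu

theorem pvBwdGo (a1 a2 : List Char) (F : List (PySem.Set (Nat × Nat × Int)))
    (hwl : pvWL a1 a2 F)
    (hcl : ∀ ℓ, ∀ st ∈ F.getD ℓ PySem.Set.empty, ∀ t ∈ pvSuccs a1 a2 st,
      t ∈ F.getD (t.1 + t.2.1) PySem.Set.empty) :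
    ∀ (K : Nat) (w : PySem.Dict (Nat × Nat × Int) Bool), pvInv a1 a2 w →
      (∀ ℓ st, st ∈ F.getD ℓ PySem.Set.empty → K < ℓ → w.contains st = true) →
      pvInv a1 a2 (((List.range (K + 1)).reverse).foldl
        (fun win L => (F.getD L PySem.Set.empty).foldl (pvBwdIns a1 a2) win) w) ∧
      (∀ ℓ st, st ∈ F.getD ℓ PySem.Set.empty → ℓ ≤ K →
        (((List.range (K + 1)).reverse).foldl
          (fun win L => (F.getD L PySem.Set.empty).foldl (pvBwdIns a1 a2) win) w).contains st = true) := by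
  intro K
  induction K with
  | zero =>
    intro w hInv hcov
    have hS : ∀ st ∈ F.getD 0 PySem.Set.empty, ∀ t ∈ pvSuccs a1 a2 st, w.contains t = true := by
      intro st hst t ht
      obtain ⟨hl, hg⟩ := hwl 0 st hst
      obtain ⟨hk, -⟩ := pvSuccs_key a1 a2 st t ht hg.1 hg.2
      exact hcov (t.1 + t.2.1) t (hcl 0 st hst t ht) (by omega)
    obtain ⟨g1, g2, g3⟩ := pvBwdLevel a1 a2 (F.getD 0 PySem.Set.empty) w hInv hS
    refine ⟨by simpa using g1, ?_⟩
    intro ℓ st hst hle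
    have : ℓ = 0 := by omega
    subst this
    simpa using g3 st hst
  | succ K ih =>
    intro w hInv hcov
    have hlist : (List.range (K + 1 + 1)).reverse = (K + 1) :: (List.range (K + 1)).reverse := by
      rw [List.range_succ, List.reverse_append]
      rfl
    rw [hlist]
    simp only [List.foldl_cons]
    have hS : ∀ st ∈ F.getD (K+1) PySem.Set.empty, ∀ t ∈ pvSuccs a1 a2 st, w.contains t = true := by
      intro st hst t ht
      obtain ⟨hl, hg⟩ := hwl (K+1) st hst
      obtain ⟨hk, -⟩ := pvSuccs_key a1 a2 st t ht hg.1 hg.2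
      exact hcov (t.1 + t.2.1) t (hcl (K+1) st hst t ht) (by omega)
    obtain ⟨g1, g2, g3⟩ := pvBwdLevel a1 a2 (F.getD (K+1) PySem.Set.empty) w hInv hS
    set w1 := (F.getD (K+1) PySem.Set.empty).foldl (pvBwdIns a1 a2) w with hw1
    obtain ⟨r1, r2⟩ := ih w1 g1 (by
      intro ℓ st hst hK
      by_cases hcase : ℓ = K + 1
      · subst hcase
        exact g3 st hst
      · exact g2 st (hcov ℓ st hst (by omega)))
    refine ⟨r1, ?_⟩
    intro ℓ st hst hle
    by_cases hcase : ℓ = K + 1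
    · subst hcase
      -- carried through the remaining fold: prove contains monotone over the remaining fold
      have hmono : ∀ (L : List Nat) (ww : PySem.Dict (Nat × Nat × Int) Bool) (x : Nat × Nat × Int),
          ww.contains x = true →
          (L.foldl (fun win L => (F.getD L PySem.Set.empty).foldl (pvBwdIns a1 a2) win) ww).contains x = true := by
        intro L
        induction L with
        | nil => intro ww x hx; exact hx
        | cons L0 Ls ihL =>
          intro ww x hx
          simp only [List.foldl_cons]
          apply ihL
          -- contains monotone over one level fold
          have : ∀ (S : List (Nat × Nat × Int)) (d : PySem.Dict (Nat × Nat × Int) Bool),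
              d.contains x = true → (S.foldl (pvBwdIns a1 a2) d).contains x = true := by
            intro S
            induction S with
            | nil => intro d hd; exact hd
            | cons u S ihS =>
              intro d hd
              simp only [List.foldl_cons]
              apply ihS
              unfold pvBwdIns
              rw [PySem.Dict.contains_insert, hd, Bool.or_true]
          exact this _ ww hx
      exact hmono _ w1 st (g3 st hst)
    · exact r2 ℓ st hst (by omega)

theorem pvAlt_eq (s1 s2 : String) :
    possiblyEquals_alt s1 s2 = pvW s1.toList s2.toList (0, 0, 0) := by
  unfold possiblyEquals_alt
  simp only
  set a1 := s1.toList
  set a2 := s2.toList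
  set M := a1.length + a2.length + 1 with hM
  set lv0 := pvBucketAdd (List.replicate M PySem.Set.empty) 0 (0, 0, 0) with hlv0
  have hlen0 : lv0.length = M := by
    rw [hlv0, pvBucketAdd_length, List.length_replicate]
  have hgetrep : ∀ ℓ : Nat, (List.replicate M (PySem.Set.empty (α := Nat × Nat × Int))).getD ℓ PySem.Set.empty = PySem.Set.empty := by
    intro ℓ
    by_cases h : ℓ < M
    · rw [List.getD_eq_getElem?_getD, List.getElem?_replicate, if_pos h]
      rfl
    · exact pvGetD_of_ge _ ℓ (by rw [List.length_replicate]; omega)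
  have hget0 : ∀ ℓ x, x ∈ lv0.getD ℓ PySem.Set.empty ↔ (x = ((0,0,0) : Nat × Nat × Int) ∧ ℓ = 0) := by
    intro ℓ x
    rw [hlv0, pvBucketAdd_mem, hgetrep ℓ]
    constructor
    · rintro (h | ⟨rfl, rfl, -⟩)
      · exact absurd h (List.not_mem_nil)
      · exact ⟨rfl, rfl⟩
    · rintro ⟨rfl, rfl⟩
      exact Or.inr ⟨rfl, rfl, by rw [List.length_replicate]; omega⟩
  have hinv0 : pvFwdInv a1 a2 0 lv0 := by
    refine ⟨hlen0, ?_, ?_, ?_⟩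
    · intro ℓ st hst
      obtain ⟨rfl, rfl⟩ := (hget0 ℓ st).mp hst
      exact ⟨rfl, Nat.zero_le _, Nat.zero_le _⟩
    · exact (hget0 0 _).mpr ⟨rfl, rfl⟩
    · intro ℓ h; omega
  have hF := pvForward_inv a1 a2 M lv0 hinv0
  have hFdef : pvForward a1 a2 lv0 = (List.range M).foldl (fun lv L => pvFwdStep a1 a2 lv L) lv0 := by
    unfold pvForward pvFwdStep
    rfl
  rw [hFdef] at *
  set F := (List.range M).foldl (fun lv L => pvFwdStep a1 a2 lv L) lv0 with hFeq
  obtain ⟨hFlen, hFwl, hFstart, hFcl⟩ := hF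
  have hclosure : ∀ ℓ, ∀ st ∈ F.getD ℓ PySem.Set.empty, ∀ t ∈ pvSuccs a1 a2 st,
      t ∈ F.getD (t.1 + t.2.1) PySem.Set.empty := by
    intro ℓ st hst t ht
    by_cases h : ℓ < M
    · exact hFcl ℓ h st hst t ht
    · rw [pvGetD_of_ge F ℓ (by omega)] at hst
      exact absurd hst (List.not_mem_nil)
  have hcov0 : ∀ ℓ st, st ∈ F.getD ℓ PySem.Set.empty → (M - 1) < ℓ →
      (PySem.Dict.empty (κ := Nat × Nat × Int) (ν := Bool)).contains st = true := by
    intro ℓ st hst hgt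
    have := (hFwl ℓ st hst).1
    have hg := (hFwl ℓ st hst).2
    unfold pvGood at hg
    omega
  have hgo := pvBwdGo a1 a2 F hFwl hclosure (M - 1) PySem.Dict.empty
    (fun st b hb => by rw [PySem.Dict.get?_empty] at hb; cases hb)
    hcov0
  have hKM : M - 1 + 1 = M := by omega
  rw [hKM] at hgo
  obtain ⟨hInvR, hcovR⟩ := hgo
  have hBdef : pvBackward a1 a2 F = ((List.range M).reverse).foldl
      (fun win L => (F.getD L PySem.Set.empty).foldl (pvBwdIns a1 a2) win) PySem.Dict.empty := by
    unfold pvBackward pvBwdIns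
    rfl
  rw [hBdef]
  set R := ((List.range M).reverse).foldl
      (fun win L => (F.getD L PySem.Set.empty).foldl (pvBwdIns a1 a2) win) PySem.Dict.empty with hR
  have hstartF : ((0,0,0) : Nat × Nat × Int) ∈ F.getD 0 PySem.Set.empty := hFstart
  have hcont : R.contains (0, 0, 0) = true := hcovR 0 (0,0,0) hstartF (by omega)
  have hsome : (R.get? (0, 0, 0)).isSome = true := by
    rw [PySem.Dict.contains_eq_isSome_get?] at hcont
    exact hcont
  obtain ⟨b, hb⟩ := Option.isSome_iff_exists.mp hsome
  rw [PySem.Dict.getD_eq_get?_getD, hb, Option.getD_some, hInvR (0,0,0) b hb]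

theorem pvAB_eq (s1 s2 : String) : possiblyEquals s1 s2 = possiblyEquals_alt s1 s2 := by
  rw [pvA_eq, pvAlt_eq]

-- ===== VERDICT (by name: the statement is the Claim_ definition above) =====
theorem possiblyEquals_spec : Claim_equal_possiblyEquals := by
  intro s1 s2 _
  unfold Spec_possiblyEquals
  exact pvAB_eq s1 s2
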